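-- pv_equiv track=rewrite | github.com/bruhmanbot/mjc | cli-mj/hand_situation.py | open_straights_eval
-- ===== SOURCE A (Python) =====
-- def open_straights_eval(tilesList):
--     openStraights = []
--     g = 0
--     while g < len(tilesList):
--         if ((tilesList[g] + 1) in tilesList and tilesList[g]<40):
--                 # remTile[g] + 2 cannot be in tilesList or else it will have been extracted as a straight
--             t = tilesList[g]
--             if (t % 10 in [1,8]):
--                     # edgeStraights.append(list([t, t+1]))
--                 g = g + 1
--                 continue
--                     # reserve for later
--             else:
--                 tilesList.remove(t)
--                 tilesList.remove(t+1)
--                 openStraights.append(list([t, t+1]))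
--             g = 0
--
--         else:
--             g = g + 1
--     return openStraights
-- ===== SOURCE B (Python) =====
-- def open_straights_eval(tilesList):
--     # Single forward pass: cnt[v] = unconsumed occurrences of v anywhere,
--     # skip[v] = occurrences of v already consumed as a pair partner that the
--     # scan has not passed yet.  O(n) instead of A's rescan-from-zero loop.
--     cnt = {}
--     for t in tilesList:
--         cnt[t] = cnt.get(t, 0) + 1
--     skip = {}
--     out = []
--     for t in tilesList:
--         if skip.get(t, 0) > 0:
--             skip[t] = skip[t] - 1
--             continue
--         if cnt.get(t + 1, 0) > 0 and t < 40 and t % 10 not in (1, 8):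
--             cnt[t] -= 1
--             cnt[t + 1] -= 1
--             skip[t + 1] = skip.get(t + 1, 0) + 1
--             out.append([t, t + 1])
--     return out
-- ===== Notes on version B (the rewrite author's own statement) =====
-- stated objective: faster
-- what changed: Replaces A's while loop that rescans from index 0 after every extraction (with list.remove and repeated 'in' membership scans) by a single forward pass using two count dictionaries: remaining unconsumed occurrences and pending skips for partner tiles already consumed ahead of the scan.
import Mathlib
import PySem

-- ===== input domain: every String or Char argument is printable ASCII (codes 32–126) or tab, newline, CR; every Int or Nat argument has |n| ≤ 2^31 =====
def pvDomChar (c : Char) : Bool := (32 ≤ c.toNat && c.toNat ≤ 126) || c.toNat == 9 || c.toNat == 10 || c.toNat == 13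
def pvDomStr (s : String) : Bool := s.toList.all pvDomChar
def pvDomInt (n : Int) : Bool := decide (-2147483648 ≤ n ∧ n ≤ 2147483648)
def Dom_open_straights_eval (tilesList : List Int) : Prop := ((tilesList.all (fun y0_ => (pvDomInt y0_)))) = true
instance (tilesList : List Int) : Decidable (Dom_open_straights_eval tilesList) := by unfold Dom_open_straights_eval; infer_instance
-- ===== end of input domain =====

-- B replaces A's rescan-from-zero while loop by one forward pass with two count
-- dictionaries; equivalence is about the RETURN value only (A empties extracted
-- tiles out of its argument list in place, B does not mutate it).

-- ===== PORT A =====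
-- while loop of A; `t % 10` is Python's mod (PySem.Int.mod); list.remove = erase of the
-- first occurrence (exact here: both removed values are present when the branch runs).
def osLoopA (tiles : List Int) (g : Nat) (acc : List (List Int)) : List (List Int) :=
  if h : g < tiles.length then
    let t := tiles[g]
    if (t + 1) ∈ tiles ∧ t < 40 then
      if PySem.Int.mod t 10 = 1 ∨ PySem.Int.mod t 10 = 8 then
        osLoopA tiles (g + 1) acc
      else
        osLoopA ((tiles.erase t).erase (t + 1)) 0 (acc ++ [[t, t + 1]])
    else
      osLoopA tiles (g + 1) acc
  else acc
termination_by (tiles.length, tiles.length - g)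
decreasing_by
  · exact Prod.Lex.right _ (by omega)
  · refine Prod.Lex.left _ _ ?_
    calc ((tiles.erase tiles[g]).erase (tiles[g] + 1)).length
        ≤ (tiles.erase tiles[g]).length := List.length_erase_le
      _ < tiles.length := by
          rw [List.length_erase_of_mem (List.getElem_mem h)]
          omega
  · exact Prod.Lex.right _ (by omega)

def open_straights_eval (tilesList : List Int) : List (List Int) :=
  osLoopA tilesList 0 []

-- ===== PORT B =====
def open_straights_eval_alt (tilesList : List Int) : List (List Int) :=
  let cnt0 : PySem.Dict Int Int :=
    tilesList.foldl (fun d t => d.insert t (d.getD t 0 + 1)) PySem.Dict.empty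
  let res :=
    tilesList.foldl
      (fun (st : PySem.Dict Int Int × PySem.Dict Int Int × List (List Int)) t =>
        let cnt := st.1
        let skip := st.2.1
        let out := st.2.2
        if skip.getD t 0 > 0 then
          (cnt, skip.insert t (skip.getD t 0 - 1), out)
        else if cnt.getD (t + 1) 0 > 0 ∧ t < 40 ∧
                ¬(PySem.Int.mod t 10 = 1 ∨ PySem.Int.mod t 10 = 8) then
          ((cnt.insert t (cnt.getD t 0 - 1)).insert (t + 1) (cnt.getD (t + 1) 0 - 1),
           skip.insert (t + 1) (skip.getD (t + 1) 0 + 1),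
           out ++ [[t, t + 1]])
        else
          (cnt, skip, out))
      (cnt0, PySem.Dict.empty, [])
  res.2.2

-- ===== PRECONDITION & SPEC =====
def Spec_open_straights_eval (tilesList : List Int) (out : List (List Int)) : Prop := out = open_straights_eval_alt tilesList
instance (tilesList : List Int) (out : List (List Int)) : Decidable (Spec_open_straights_eval tilesList out) := by unfold Spec_open_straights_eval; infer_instance

-- ===== CLAIM (what is proved, stated in full; the proofs are below) =====
def Claim_equal_open_straights_eval : Prop := ∀ (tilesList : List Int), Dom_open_straights_eval tilesList → Spec_open_straights_eval tilesList (open_straights_eval tilesList)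

-- ===== LEMMAS AND PROOFS =====

-- eligibility of a tile value t w.r.t. the current multiset of tiles
def eligB (t : Int) (l : List Int) : Bool :=
  decide ((t + 1) ∈ l) && decide (t < 40) &&
    !(decide (PySem.Int.mod t 10 = 1 ∨ PySem.Int.mod t 10 = 8))

-- the common middle model: repeatedly extract the first eligible tile
def F (l : List Int) : List (List Int) :=
  match h : l.find? (fun t => eligB t l) with
  | none => []
  | some t => [t, t + 1] :: F ((l.erase t).erase (t + 1))
termination_by l.length
decreasing_by
  have ht : t ∈ l := List.mem_of_find?_eq_some h
  calc ((l.erase t).erase (t + 1)).length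
      ≤ (l.erase t).length := List.length_erase_le
    _ < l.length := by
        rw [List.length_erase_of_mem ht]
        have : 0 < l.length := List.length_pos_of_mem ht
        omega

theorem F_none {l : List Int} (h : l.find? (fun t => eligB t l) = none) : F l = [] := by
  rw [F]; split <;> simp_all

theorem F_some {l : List Int} {t : Int} (h : l.find? (fun t => eligB t l) = some t) :
    F l = [t, t + 1] :: F ((l.erase t).erase (t + 1)) := by
  rw [F]; split <;> simp_all

-- pointwise function update
def updf (s : Int → Int) (k v : Int) : Int → Int := fun x => if x = k then v else s x

-- model of B's scanning loop
def bgo (rest : List Int) (c s : Int → Int) : List (List Int) :=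
  match rest with
  | [] => []
  | t :: r =>
    if s t > 0 then bgo r c (updf s t (s t - 1))
    else if c (t + 1) > 0 ∧ t < 40 ∧
            ¬(PySem.Int.mod t 10 = 1 ∨ PySem.Int.mod t 10 = 8) then
      [t, t + 1] :: bgo r (updf (updf c t (c t - 1)) (t + 1) (c (t + 1) - 1))
                          (updf s (t + 1) (s (t + 1) + 1))
    else bgo r c s

-- rest with, for each value v, its first (s v) occurrences dropped
def strip (rest : List Int) (s : Int → Int) : List Int :=
  match rest with
  | [] => []
  | t :: r => if s t > 0 then strip r (updf s t (s t - 1)) else t :: strip r s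



-- ---- small facts about eligB ----

theorem eligB_of_parts {t : Int} {l : List Int} (h1 : (t + 1) ∈ l) (h2 : t < 40)
    (h3 : ¬(PySem.Int.mod t 10 = 1 ∨ PySem.Int.mod t 10 = 8)) : eligB t l = true := by
  simp only [eligB, Bool.and_eq_true, decide_eq_true_eq, Bool.not_eq_eq_eq_not,
    Bool.not_true, decide_eq_false_iff_not]
  exact ⟨⟨h1, h2⟩, h3⟩

theorem eligB_mono {t : Int} {l l' : List Int} (hsub : ∀ v, v ∈ l' → v ∈ l)
    (h : eligB t l' = true) : eligB t l = true := by
  simp only [eligB, Bool.and_eq_true, decide_eq_true_eq, Bool.not_eq_eq_eq_not,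
    Bool.not_true, decide_eq_false_iff_not] at h ⊢
  exact ⟨⟨hsub _ h.1.1, h.1.2⟩, h.2⟩

theorem eligB_false_mono {t : Int} {l l' : List Int} (hsub : ∀ v, v ∈ l' → v ∈ l)
    (h : eligB t l = false) : eligB t l' = false := by
  cases he : eligB t l' with
  | false => rfl
  | true => rw [eligB_mono hsub he] at h; exact absurd h (by simp)

-- ---- find? helpers ----

theorem find?_congr' (p q : Int → Bool) (l : List Int) (h : ∀ a ∈ l, p a = q a) :
    l.find? p = l.find? q := by
  induction l with
  | nil => rfl
  | cons x xs ih =>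
    have hx := h x (by simp)
    simp only [List.find?_cons, hx]
    cases hq : q x with
    | true => rfl
    | false => exact ih (fun a ha => h a (by simp [ha]))

theorem find?_filter (p q : Int → Bool) (l : List Int)
    (h : ∀ v ∈ l, p v = true → q v = true) : l.find? p = (l.filter q).find? p := by
  induction l with
  | nil => rfl
  | cons x xs ih =>
    have ih' := ih (fun v hv => h v (by simp [hv]))
    cases hq : q x with
    | true =>
      simp only [List.filter_cons, hq, if_pos, List.find?_cons]
      cases p x <;> simp [ih']
    | false =>
      have hp : p x = false := by
        cases hpv : p x with
        | false => rfl
        | true => rw [h x (by simp) hpv] at hq; exact absurd hq (by simp)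
      simp [hq, hp, ih']

-- ---- F congruence: lists with equal multisets and the same plausibly-eligible
-- filtered subsequence have the same extraction trace ----

theorem F_congr : ∀ (n : Nat) (l₁ l₂ : List Int) (q : Int → Bool), l₁.length ≤ n →
    (∀ v, l₁.count v = l₂.count v) → l₁.filter q = l₂.filter q →
    (∀ v ∈ l₁, eligB v l₁ = true → q v = true) → F l₁ = F l₂ := by
  intro n
  induction n with
  | zero =>
    intro l₁ l₂ q hlen hcount _ _
    have h1 : l₁ = [] := List.length_eq_zero_iff.mp (Nat.le_zero.mp hlen)
    have h2 : l₂ = [] := by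
      by_contra hne
      obtain ⟨x, hx⟩ := List.exists_mem_of_ne_nil l₂ hne
      have hcx := hcount x
      rw [h1] at hcx
      simp only [List.count_nil] at hcx
      have := List.count_pos_iff.mpr hx
      omega
    rw [h1, h2]
  | succ n ih =>
    intro l₁ l₂ q hlen hcount hfilter helig
    have hmem : ∀ v, v ∈ l₁ ↔ v ∈ l₂ := by
      intro v; rw [← List.count_pos_iff, ← List.count_pos_iff, hcount]
    have heq : ∀ v, eligB v l₁ = eligB v l₂ := by
      intro v
      simp only [eligB, hmem]
    have hc2 : ∀ v ∈ l₂, eligB v l₂ = true → q v = true := by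
      intro v hv he
      exact helig v ((hmem v).mpr hv) (by rw [heq v]; exact he)
    have hfind : l₁.find? (fun t => eligB t l₁) = l₂.find? (fun t => eligB t l₂) := by
      rw [find?_filter (fun t => eligB t l₁) q l₁ helig,
          find?_filter (fun t => eligB t l₂) q l₂ hc2, hfilter]
      exact find?_congr' _ _ _ (fun a _ => heq a)
    cases hf : l₁.find? (fun t => eligB t l₁) with
    | none =>
      rw [F_none hf, F_none (by rw [← hfind]; exact hf)]
    | some t =>
      have hf2 : l₂.find? (fun t => eligB t l₂) = some t := by rw [← hfind]; exact hf
      have ht1 : t ∈ l₁ := List.mem_of_find?_eq_some hf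
      rw [F_some hf, F_some hf2]
      congr 1
      apply ih _ _ q
      · have h1 : (l₁.erase t).length = l₁.length - 1 := List.length_erase_of_mem ht1
        have h2 : ((l₁.erase t).erase (t + 1)).length ≤ (l₁.erase t).length :=
          List.length_erase_le
        have h3 := List.length_pos_of_mem ht1
        omega
      · intro v
        simp only [List.count_erase]
        rw [hcount v]
      · simp only [← List.erase_filter]
        rw [hfilter]
      · intro v hv he
        have hv1 : v ∈ l₁ := List.mem_of_mem_erase (List.mem_of_mem_erase hv)
        refine helig v hv1 (eligB_mono ?_ he)
        intro x hx; exact List.mem_of_mem_erase (List.mem_of_mem_erase hx)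

-- ---- step 1: A's while loop computes F ----

theorem osLoopA_eq (tiles : List Int) (g : Nat) (acc : List (List Int)) :
    (∀ v ∈ tiles.take g, eligB v tiles = false) → osLoopA tiles g acc = acc ++ F tiles := by
  induction tiles, g, acc using osLoopA.induct with
  | case1 tiles g acc h t hcond hedge ih =>
    intro hp
    rw [osLoopA]
    simp only [dif_pos h]
    rw [if_pos (show tiles[g] + 1 ∈ tiles ∧ tiles[g] < 40 from hcond),
      if_pos (show PySem.Int.mod tiles[g] 10 = 1 ∨ PySem.Int.mod tiles[g] 10 = 8 from hedge)]
    apply ih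
    intro v hv
    rw [List.take_add_one, List.getElem?_eq_getElem h] at hv
    simp only [Option.toList_some, List.mem_append, List.mem_singleton] at hv
    rcases hv with h1 | h1
    · exact hp v h1
    · subst h1
      have hdec : decide (PySem.Int.mod tiles[g] 10 = 1 ∨ PySem.Int.mod tiles[g] 10 = 8)
          = true := decide_eq_true hedge
      simp only [eligB, hdec, Bool.not_true, Bool.and_false]
  | case2 tiles g acc h t hcond hedge ih =>
    intro hp
    have helig : eligB tiles[g] tiles = true := eligB_of_parts hcond.1 hcond.2 hedge
    have hfa : List.find? (fun v => eligB v tiles) (tiles.take g) = none :=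
      List.find?_eq_none.mpr (fun x hx => by rw [hp x hx]; simp)
    have hdrop : tiles.drop g = tiles[g] :: tiles.drop (g + 1) := List.drop_eq_getElem_cons h
    have hfind : tiles.find? (fun v => eligB v tiles) = some tiles[g] := by
      have hsplit := List.find?_append (xs := tiles.take g) (ys := tiles.drop g)
        (p := fun v => eligB v tiles)
      rw [List.take_append_drop] at hsplit
      rw [hsplit, hfa, hdrop, Option.none_or]
      rw [List.find?_cons_of_pos (p := fun v => eligB v tiles) (by simpa using helig)]
    rw [osLoopA]
    simp only [dif_pos h]
    rw [if_pos (show tiles[g] + 1 ∈ tiles ∧ tiles[g] < 40 from hcond),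
      if_neg (show ¬(PySem.Int.mod tiles[g] 10 = 1 ∨ PySem.Int.mod tiles[g] 10 = 8) from hedge)]
    rw [F_some hfind, ih (by simp)]
    simp only [List.append_assoc, List.singleton_append]
    rfl
  | case3 tiles g acc h t hcond ih =>
    intro hp
    rw [osLoopA]
    simp only [dif_pos h]
    rw [if_neg (show ¬(tiles[g] + 1 ∈ tiles ∧ tiles[g] < 40) from hcond)]
    apply ih
    intro v hv
    rw [List.take_add_one, List.getElem?_eq_getElem h] at hv
    simp only [Option.toList_some, List.mem_append, List.mem_singleton] at hv
    rcases hv with h1 | h1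
    · exact hp v h1
    · subst h1
      cases he : eligB tiles[g] tiles with
      | false => rfl
      | true =>
        simp only [eligB, Bool.and_eq_true, decide_eq_true_eq] at he
        exact absurd ⟨he.1.1, he.1.2⟩ hcond
  | case4 tiles g acc h =>
    intro hp
    rw [osLoopA]
    simp only [dif_neg h]
    have htake : tiles.take g = tiles := List.take_of_length_le (Nat.le_of_not_lt h)
    rw [F_none (List.find?_eq_none.mpr (fun x hx => by
      have hx' : x ∈ tiles.take g := by rw [htake]; exact hx
      rw [hp x hx']; simp))]
    simp

-- ---- step 2: B's dict fold computes bgo ----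

theorem foldB : ∀ (rest : List Int) (cnt skip : PySem.Dict Int Int) (out : List (List Int))
    (c s : Int → Int), (∀ v, cnt.getD v 0 = c v) → (∀ v, skip.getD v 0 = s v) →
    (rest.foldl
      (fun (st : PySem.Dict Int Int × PySem.Dict Int Int × List (List Int)) t =>
        let cnt := st.1
        let skip := st.2.1
        let out := st.2.2
        if skip.getD t 0 > 0 then
          (cnt, skip.insert t (skip.getD t 0 - 1), out)
        else if cnt.getD (t + 1) 0 > 0 ∧ t < 40 ∧
                ¬(PySem.Int.mod t 10 = 1 ∨ PySem.Int.mod t 10 = 8) then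
          ((cnt.insert t (cnt.getD t 0 - 1)).insert (t + 1) (cnt.getD (t + 1) 0 - 1),
           skip.insert (t + 1) (skip.getD (t + 1) 0 + 1),
           out ++ [[t, t + 1]])
        else
          (cnt, skip, out))
      (cnt, skip, out)).2.2 = out ++ bgo rest c s := by
  intro rest
  induction rest with
  | nil => intro cnt skip out c s hc hs; simp [bgo]
  | cons t r ih =>
    intro cnt skip out c s hc hs
    simp only [List.foldl_cons]
    by_cases h1 : s t > 0
    · rw [if_pos (show skip.getD t 0 > 0 by rw [hs]; exact h1)]
      have hs' : ∀ v, (skip.insert t (skip.getD t 0 - 1)).getD v 0 = updf s t (s t - 1) v := by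
        intro v
        rw [PySem.Dict.getD_insert]
        by_cases hv : v = t <;> simp [updf, hv, hs]
      rw [ih _ _ _ _ _ hc hs']
      simp only [bgo, if_pos h1]
    · rw [if_neg (show ¬skip.getD t 0 > 0 by rw [hs]; exact h1)]
      by_cases h2 : c (t + 1) > 0 ∧ t < 40 ∧
          ¬(PySem.Int.mod t 10 = 1 ∨ PySem.Int.mod t 10 = 8)
      · rw [if_pos (show cnt.getD (t + 1) 0 > 0 ∧ t < 40 ∧
            ¬(PySem.Int.mod t 10 = 1 ∨ PySem.Int.mod t 10 = 8) from
              ⟨by rw [hc]; exact h2.1, h2.2⟩)]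
        have hc' : ∀ v, ((cnt.insert t (cnt.getD t 0 - 1)).insert (t + 1)
            (cnt.getD (t + 1) 0 - 1)).getD v 0
            = updf (updf c t (c t - 1)) (t + 1) (c (t + 1) - 1) v := by
          intro v
          rw [PySem.Dict.getD_insert, PySem.Dict.getD_insert]
          by_cases hv1 : v = t + 1 <;> by_cases hv2 : v = t <;> simp [updf, hv1, hv2, hc]
        have hs' : ∀ v, (skip.insert (t + 1) (skip.getD (t + 1) 0 + 1)).getD v 0
            = updf s (t + 1) (s (t + 1) + 1) v := by
          intro v
          rw [PySem.Dict.getD_insert]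
          by_cases hv : v = t + 1 <;> simp [updf, hv, hs]
        rw [ih _ _ _ _ _ hc' hs']
        simp only [bgo, if_neg h1, if_pos h2]
        simp
      · rw [if_neg (show ¬(cnt.getD (t + 1) 0 > 0 ∧ t < 40 ∧
            ¬(PySem.Int.mod t 10 = 1 ∨ PySem.Int.mod t 10 = 8)) from
              fun hco => h2 ⟨by rw [← hc]; exact hco.1, hco.2⟩)]
        rw [ih _ _ _ _ _ hc hs]
        simp only [bgo, if_neg h1, if_neg h2]

theorem alt_eq_bgo (l : List Int) :
    open_straights_eval_alt l = bgo l (fun v => (l.count v : Int)) (fun _ => 0) := by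
  have h := foldB l (l.foldl (fun d t => d.insert t (d.getD t 0 + 1)) PySem.Dict.empty)
    PySem.Dict.empty [] (fun v => (l.count v : Int)) (fun _ => 0)
    (by intro v
        rw [PySem.Dict.getD_foldl_insert_add_one]
        simp [PySem.Dict.getD_empty])
    (by intro v; simp [PySem.Dict.getD_empty])
  rw [List.nil_append] at h
  exact h

-- ---- strip lemmas ----

theorem strip_congr : ∀ (l : List Int) (s s' : Int → Int), (∀ v, s v = s' v) →
    strip l s = strip l s' := by
  intro l
  induction l with
  | nil => intro s s' _; rfl
  | cons t r ih =>
    intro s s' h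
    simp only [strip, h t]
    split
    · exact ih _ _ (fun v => by by_cases hv : v = t <;> simp [updf, hv, h])
    · rw [ih _ _ h]

theorem strip_zero (l : List Int) : strip l (fun _ => 0) = l := by
  induction l with
  | nil => rfl
  | cons t r ih => simp [strip, ih]

theorem strip_inc : ∀ (l : List Int) (s : Int → Int) (v : Int), (∀ x, 0 ≤ s x) →
    strip l (updf s v (s v + 1)) = (strip l s).erase v := by
  intro l
  induction l with
  | nil => intro s v _; simp [strip]
  | cons x xs ih =>
    intro s v hs
    by_cases hxv : x = v
    · subst hxv
      have h1 : updf s x (s x + 1) x > 0 := by simp [updf]; have := hs x; omega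
      by_cases hsx : s x > 0
      · simp only [strip, if_pos h1, if_pos hsx]
        have e1 : strip xs (updf (updf s x (s x + 1)) x (updf s x (s x + 1) x - 1))
            = strip xs (updf (updf s x (s x - 1)) x ((updf s x (s x - 1)) x + 1)) :=
          strip_congr _ _ _ (by intro y; by_cases hy : y = x <;> simp [updf, hy])
        rw [e1, ih (updf s x (s x - 1)) x
          (by intro y; by_cases hy : y = x <;> simp [updf, hy, hs y]; omega)]
      · simp only [strip, if_pos h1, if_neg hsx]
        rw [List.erase_cons_head]
        exact strip_congr _ _ _ (by intro y; by_cases hy : y = x <;> simp [updf, hy])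
    · have hux : updf s v (s v + 1) x = s x := by simp [updf, hxv]
      by_cases hsx : s x > 0
      · simp only [strip, hux, if_pos hsx]
        have e1 : strip xs (updf (updf s v (s v + 1)) x (s x - 1))
            = strip xs (updf (updf s x (s x - 1)) v ((updf s x (s x - 1)) v + 1)) :=
          strip_congr _ _ _ (by
            intro y
            by_cases h1 : y = x
            · subst h1; simp [updf, hxv]
            · by_cases h2 : y = v
              · subst h2; simp [updf, h1]
              · simp [updf, h1, h2])
        rw [e1, ih (updf s x (s x - 1)) v
          (by intro y; by_cases hy : y = x <;> simp [updf, hy, hs y]; omega)]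
      · simp only [strip, hux, if_neg hsx]
        rw [List.erase_cons, if_neg (by simp [hxv]), ih s v hs]

-- ---- step 3: B's single pass computes F ----

theorem bgo_eq_F : ∀ (rest p : List Int) (c s : Int → Int),
    (∀ v, c v = ((p ++ strip rest s).count v : Int)) →
    (∀ v ∈ p, eligB v (p ++ strip rest s) = false) →
    (∀ v, 0 ≤ s v) →
    bgo rest c s = F (p ++ strip rest s) := by
  intro rest
  induction rest with
  | nil =>
    intro p c s hc hp hs
    have e : p ++ strip ([] : List Int) s = p := by simp [strip]
    simp only [e] at hp ⊢
    rw [F_none (List.find?_eq_none.mpr (fun x hx => by rw [hp x hx]; simp))]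
    rfl
  | cons t r ih =>
    intro p c s hc hp hs
    by_cases hst : s t > 0
    · have e : strip (t :: r) s = strip r (updf s t (s t - 1)) := by
        simp only [strip, if_pos hst]
      simp only [e] at hc hp ⊢
      simp only [bgo, if_pos hst]
      refine ih p c _ hc hp ?_
      intro v
      by_cases hv : v = t
      · simp only [updf, if_pos hv]; omega
      · simp only [updf, if_neg hv]; exact hs v
    · have e : strip (t :: r) s = t :: strip r s := by simp only [strip, if_neg hst]
      simp only [e] at hc hp ⊢
      set q := strip r s with hq
      have hne : (t + 1) ≠ t := by omega
      by_cases hC : c (t + 1) > 0 ∧ t < 40 ∧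
          ¬(PySem.Int.mod t 10 = 1 ∨ PySem.Int.mod t 10 = 8)
      · obtain ⟨hC1, hC2, hC3⟩ := hC
        have hcnt1 : 0 < (p ++ t :: q).count (t + 1) := by
          have h0 : (0 : Int) < ((p ++ t :: q).count (t + 1) : Int) := by
            rw [← hc (t + 1)]; exact hC1
          exact_mod_cast h0
        have hmemt1 : (t + 1) ∈ p ++ t :: q := List.count_pos_iff.mp hcnt1
        have helig : eligB t (p ++ t :: q) = true := eligB_of_parts hmemt1 hC2 hC3
        have htnp : t ∉ p := by
          intro hm
          have hf := hp t hm
          rw [hf] at helig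
          exact absurd helig (by simp)
        have hfind : (p ++ t :: q).find? (fun v => eligB v (p ++ t :: q)) = some t := by
          rw [List.find?_append, List.find?_eq_none.mpr
            (fun x hx => by rw [hp x hx]; simp)]
          simp [helig]
        rw [F_some hfind]
        have her1 : (p ++ t :: q).erase t = p ++ q := by
          rw [List.erase_append_right _ htnp, List.erase_cons_head]
        rw [her1]
        simp only [bgo, if_neg hst, if_pos (⟨hC1, hC2, hC3⟩ : _ ∧ _ ∧ _)]
        congr 1
        have hstrip' : strip r (updf s (t + 1) (s (t + 1) + 1)) = q.erase (t + 1) := by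
          rw [hq]; exact strip_inc r s (t + 1) hs
        have hs' : ∀ v, 0 ≤ updf s (t + 1) (s (t + 1) + 1) v := by
          intro v
          by_cases hv : v = t + 1
          · simp only [updf, if_pos hv]; have := hs (t + 1); omega
          · simp only [updf, if_neg hv]; exact hs v
        by_cases hq1 : (t + 1) ∈ q
        · -- the consumed partner occurrence sits in the unscanned suffix
          have hcq1 : 0 < q.count (t + 1) := List.count_pos_iff.mpr hq1
          have hsubq : ∀ x, x ∈ p ++ q.erase (t + 1) → x ∈ p ++ t :: q := by
            intro x hx
            rcases List.mem_append.mp hx with h1 | h1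
            · exact List.mem_append.mpr (Or.inl h1)
            · exact List.mem_append.mpr
                (Or.inr (List.mem_cons_of_mem _ (List.mem_of_mem_erase h1)))
          have hc' : ∀ v, updf (updf c t (c t - 1)) (t + 1) (c (t + 1) - 1) v
              = ((p ++ q.erase (t + 1)).count v : Int) := by
            intro v
            have hbase := hc v
            by_cases hv1 : v = t + 1
            · simp [updf, hv1, List.count_append,
                List.count_erase_self] at hbase ⊢
              try push_cast at hbase ⊢
              omega
            · by_cases hv2 : v = t
              · simp [updf, hv2, List.count_append,
                  List.count_erase_of_ne (show t ≠ t + 1 by omega)] at hbase ⊢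
                try push_cast at hbase ⊢
                omega
              · simp [updf, hv1, hv2, List.count_append, List.count_cons,
                  List.count_erase_of_ne hv1] at hbase ⊢
                try push_cast at hbase ⊢
                omega
          have ihres := ih p (updf (updf c t (c t - 1)) (t + 1) (c (t + 1) - 1))
            (updf s (t + 1) (s (t + 1) + 1))
            (fun v => by rw [hstrip']; exact hc' v)
            (fun v hv => by rw [hstrip']; exact eligB_false_mono hsubq (hp v hv))
            hs'
          rw [hstrip'] at ihres
          rw [ihres]
          by_cases hp1 : (t + 1) ∈ p
          · have hQf : eligB (t + 1) (p ++ q) = false := by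
              refine eligB_false_mono ?_ (hp (t + 1) hp1)
              intro x hx
              rcases List.mem_append.mp hx with h1 | h1
              · exact List.mem_append.mpr (Or.inl h1)
              · exact List.mem_append.mpr (Or.inr (List.mem_cons_of_mem _ h1))
            apply F_congr (p ++ q.erase (t + 1)).length _ _
              (fun v => eligB v (p ++ q)) le_rfl
            · intro v
              by_cases hv1 : v = t + 1
              · subst hv1
                simp only [List.count_append, List.count_erase_self]
                omega
              · simp only [List.count_append, List.count_erase_of_ne hv1]
            · have hnotin1 : (t + 1) ∉ (p ++ q).filter (fun v => eligB v (p ++ q)) := by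
                intro hmem
                have h2 := (List.mem_filter.mp hmem).2
                rw [hQf] at h2
                exact absurd h2 (by simp)
              have hnotin2 : (t + 1) ∉ q.filter (fun v => eligB v (p ++ q)) := by
                intro hmem
                have h2 := (List.mem_filter.mp hmem).2
                rw [hQf] at h2
                exact absurd h2 (by simp)
              rw [List.filter_append, ← List.erase_filter,
                List.erase_of_not_mem hnotin2, ← List.filter_append]
              conv_rhs => rw [← List.erase_filter]
              rw [List.erase_of_not_mem hnotin1]
            · intro v _ he
              refine eligB_mono ?_ he
              intro x hx
              rcases List.mem_append.mp hx with h1 | h1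
              · exact List.mem_append.mpr (Or.inl h1)
              · exact List.mem_append.mpr (Or.inr (List.mem_of_mem_erase h1))
          · rw [List.erase_append_right _ hp1]
        · -- the consumed partner occurrence is an already-skipped earlier tile
          have hp1 : (t + 1) ∈ p := by
            rcases List.mem_append.mp hmemt1 with h1 | h1
            · exact h1
            · rcases List.mem_cons.mp h1 with h2 | h2
              · exact absurd h2 hne
              · exact absurd h2 hq1
          have hcp1 : 0 < p.count (t + 1) := List.count_pos_iff.mpr hp1
          have hsubp : ∀ x, x ∈ p.erase (t + 1) ++ q → x ∈ p ++ t :: q := by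
            intro x hx
            rcases List.mem_append.mp hx with h1 | h1
            · exact List.mem_append.mpr (Or.inl (List.mem_of_mem_erase h1))
            · exact List.mem_append.mpr (Or.inr (List.mem_cons_of_mem _ h1))
          have hqe : q.erase (t + 1) = q := List.erase_of_not_mem hq1
          have hc' : ∀ v, updf (updf c t (c t - 1)) (t + 1) (c (t + 1) - 1) v
              = ((p.erase (t + 1) ++ q).count v : Int) := by
            intro v
            have hbase := hc v
            by_cases hv1 : v = t + 1
            · simp [updf, hv1, List.count_append,
                List.count_erase_self] at hbase ⊢
              try push_cast at hbase ⊢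
              omega
            · by_cases hv2 : v = t
              · simp [updf, hv2, List.count_append,
                  List.count_erase_of_ne (show t ≠ t + 1 by omega)] at hbase ⊢
                try push_cast at hbase ⊢
                omega
              · simp [updf, hv1, hv2, List.count_append, List.count_cons,
                  List.count_erase_of_ne hv1] at hbase ⊢
                try push_cast at hbase ⊢
                omega
          have ihres := ih (p.erase (t + 1))
            (updf (updf c t (c t - 1)) (t + 1) (c (t + 1) - 1))
            (updf s (t + 1) (s (t + 1) + 1))
            (fun v => by rw [hstrip', hqe]; exact hc' v)
            (fun v hv => by
              rw [hstrip', hqe]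
              exact eligB_false_mono hsubp (hp v (List.mem_of_mem_erase hv)))
            hs'
          rw [hstrip', hqe] at ihres
          rw [List.erase_append_left _ hp1, ihres]
      · -- no extraction at this tile
        have helig : eligB t (p ++ t :: q) = false := by
          cases he : eligB t (p ++ t :: q) with
          | false => rfl
          | true =>
            simp only [eligB, Bool.and_eq_true, decide_eq_true_eq,
              Bool.not_eq_eq_eq_not, Bool.not_true, decide_eq_false_iff_not] at he
            refine absurd ⟨?_, he.1.2, he.2⟩ hC
            have hpos : 0 < (p ++ t :: q).count (t + 1) := List.count_pos_iff.mpr he.1.1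
            rw [hc]
            exact_mod_cast hpos
        have e2 : (p ++ [t]) ++ q = p ++ t :: q := by simp
        simp only [bgo, if_neg hst, if_neg hC]
        have ihres := ih (p ++ [t]) c s
          (fun v => by rw [← hq, e2]; exact hc v)
          (fun v hv => by
            rw [← hq, e2]
            rcases List.mem_append.mp hv with h1 | h1
            · exact hp v h1
            · have hvt : v = t := by simpa using h1
              rw [hvt]; exact helig)
          hs
        rw [← hq, e2] at ihres
        exact ihres


theorem alt_eq_F (l : List Int) : open_straights_eval_alt l = F l := by
  rw [alt_eq_bgo]
  have h := bgo_eq_F l [] (fun v => (l.count v : Int)) (fun _ => 0)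
    (by intro v; simp [strip_zero]) (by simp) (by intro v; simp)
  simpa [strip_zero] using h

-- ===== VERDICT (by name: the statement is the Claim_ definition above) =====
theorem open_straights_eval_spec : Claim_equal_open_straights_eval := by
  intro l _
  unfold Spec_open_straights_eval
  have ha : open_straights_eval l = F l := by
    unfold open_straights_eval
    rw [osLoopA_eq l 0 [] (by simp)]
    simp
  rw [ha, alt_eq_F]
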